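-- pv_equiv track=rewrite | github.com/teodor1006/Bachelor-thesis | DQC_Partition/RandomPartitions.py | count_global_gates
-- ===== SOURCE A (Python) =====
-- def count_global_gates(gate_list,part_qbits):
--     global_gates = 0
--     for gate in gate_list:
--         gate_qbits = set(gate)
--         is_global = True
--         for qubits in part_qbits:
--             if gate_qbits.issubset(qubits):
--                 is_global = False
--                 break
--         if is_global:
--             global_gates += 1
--     return global_gates
-- ===== SOURCE B (Python) =====
-- def count_global_gates(gate_list, part_qbits):
--     # Precompute qubit -> list of partition indices containing it, then decide each
--     # gate by intersecting candidate index lists (exact even for overlapping partitions).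
--     owners = {}
--     for i, qubits in enumerate(part_qbits):
--         for q in qubits:
--             owners.setdefault(q, []).append(i)
--     count = 0
--     has_parts = bool(part_qbits)
--     for gate in gate_list:
--         if not gate:
--             if not has_parts:
--                 count += 1
--             continue
--         cand = owners.get(gate[0], [])
--         for q in gate[1:]:
--             if not cand:
--                 break
--             oq = owners.get(q, [])
--             cand = [i for i in cand if i in oq]
--         if not cand:
--             count += 1
--     return count
-- ===== Notes on version B (the rewrite author's own statement) =====
-- stated objective: faster
-- what changed: Instead of testing every gate against every partition with set.issubset, B precomputes a qubit -> list-of-partition-indices map once and decides each gate by intersecting the candidate index lists of its qubits (with early exit when the candidate set empties).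
import Mathlib
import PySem

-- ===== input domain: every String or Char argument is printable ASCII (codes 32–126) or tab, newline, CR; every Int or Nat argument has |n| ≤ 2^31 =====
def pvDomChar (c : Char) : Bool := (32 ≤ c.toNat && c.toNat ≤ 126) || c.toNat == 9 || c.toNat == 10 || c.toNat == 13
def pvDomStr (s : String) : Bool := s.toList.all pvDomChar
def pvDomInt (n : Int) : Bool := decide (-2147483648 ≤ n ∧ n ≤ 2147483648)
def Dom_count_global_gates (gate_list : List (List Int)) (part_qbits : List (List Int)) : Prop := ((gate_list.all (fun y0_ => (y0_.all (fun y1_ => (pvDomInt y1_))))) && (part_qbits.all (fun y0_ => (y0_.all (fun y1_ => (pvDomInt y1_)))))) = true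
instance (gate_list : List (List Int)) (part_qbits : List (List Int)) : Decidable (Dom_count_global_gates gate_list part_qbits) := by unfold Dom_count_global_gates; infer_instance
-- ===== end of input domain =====

-- B replaces A's per-gate scan over all partitions by a precomputed qubit→partition-index map,
-- intersecting candidate index lists per gate (objective: faster on many/large partitions).

-- ===== PORT A =====
-- inner 'for qubits in part_qbits: if gate_qbits.issubset(qubits): is_global=False; break'
def aIsGlobal (gq : PySem.Set Int) (parts : List (List Int)) : Bool :=
  match parts with
  | [] => true
  | p :: rest => if PySem.Set.issubset gq p then false else aIsGlobal gq rest

def count_global_gates (gate_list : List (List Int)) (part_qbits : List (List Int)) : Int :=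
  gate_list.foldl (fun acc gate =>
    let gate_qbits := PySem.Set.ofList gate
    if aIsGlobal gate_qbits part_qbits then acc + 1 else acc) 0

-- ===== PORT B =====
-- owners = {}; for i, qubits in enumerate(part_qbits): for q in qubits: owners.setdefault(q, []).append(i)
def bOwners (parts : List (List Int)) : PySem.Dict Int (List Int) :=
  (PySem.List.enumerate parts).foldl (fun d iq =>
    iq.2.foldl (fun d q => d.modify q [] (fun l => l ++ [iq.1])) d) PySem.Dict.empty

-- for q in gate[1:]: if not cand: break; cand = [i for i in cand if i in owners.get(q, [])]
def bFilter (owners : PySem.Dict Int (List Int)) (cand : List Int) (qs : List Int) : List Int :=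
  match qs with
  | [] => cand
  | q :: rest =>
    if cand.isEmpty then cand
    else bFilter owners (cand.filter (fun i => (owners.getD q []).contains i)) rest

def count_global_gates_alt (gate_list : List (List Int)) (part_qbits : List (List Int)) : Int :=
  let owners := bOwners part_qbits
  let has_parts := !part_qbits.isEmpty
  gate_list.foldl (fun acc gate =>
    match gate with
    | [] => if !has_parts then acc + 1 else acc
    | q0 :: rest =>
      let cand := bFilter owners (owners.getD q0 []) rest
      if cand.isEmpty then acc + 1 else acc) 0

-- ===== PRECONDITION & SPEC =====
def Spec_count_global_gates (gate_list : List (List Int)) (part_qbits : List (List Int)) (out : Int) : Prop := out = count_global_gates_alt gate_list part_qbits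
instance (gate_list : List (List Int)) (part_qbits : List (List Int)) (out : Int) : Decidable (Spec_count_global_gates gate_list part_qbits out) := by unfold Spec_count_global_gates; infer_instance

-- ===== CLAIM (what is proved, stated in full; the proofs are below) =====
def Claim_equal_count_global_gates : Prop := ∀ (gate_list : List (List Int)) (part_qbits : List (List Int)), Dom_count_global_gates gate_list part_qbits → Spec_count_global_gates gate_list part_qbits (count_global_gates gate_list part_qbits)

-- ===== LEMMAS AND PROOFS =====

-- the common condition: some partition contains all the gate's qubits
def pvLocal (parts : List (List Int)) (gate : List Int) : Bool :=
  parts.any (fun p => gate.all (fun q => p.contains q))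

theorem issubset_ofList (g p : List Int) :
    PySem.Set.issubset (PySem.Set.ofList g) p = g.all (fun q => p.contains q) := by
  rw [Bool.eq_iff_iff, PySem.Set.issubset_iff]
  simp [PySem.Set.mem_ofList]

theorem aIsGlobal_eq (g : List Int) (parts : List (List Int)) :
    aIsGlobal (PySem.Set.ofList g) parts = !pvLocal parts g := by
  induction parts with
  | nil => simp [aIsGlobal, pvLocal]
  | cons p rest ih =>
    rw [aIsGlobal, issubset_ofList, pvLocal, List.any_cons, Bool.not_or, ← pvLocal, ← ih]
    cases hg : g.all (fun q => p.contains q) <;> simp_all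

-- nested owners-build loop = flat loop over (qubit, index) pairs
def pvPairs (parts : List (List Int)) : List (Int × Int) :=
  (PySem.List.enumerate parts).flatMap (fun iq => iq.2.map (fun q => (q, iq.1)))

theorem bOwners_getD (parts : List (List Int)) (q : Int) :
    (bOwners parts).getD q [] = ((pvPairs parts).filter (fun pr => pr.1 == q)).map (·.2) := by
  have hfold : ∀ (l : List (Int × List Int)) (d : PySem.Dict Int (List Int)),
      l.foldl (fun d iq => iq.2.foldl (fun d q => d.modify q [] (fun l => l ++ [iq.1])) d) d
        = (l.flatMap (fun iq => iq.2.map (fun q => (q, iq.1)))).foldl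
            (fun d pr => d.modify pr.1 [] (fun l => l ++ [pr.2])) d := by
    intro l
    induction l with
    | nil => intro d; rfl
    | cons x xs ih =>
      intro d
      simp only [List.foldl_cons, List.flatMap_cons, List.foldl_append, List.foldl_map]
      exact ih _
  unfold bOwners pvPairs
  rw [hfold]
  have := PySem.Dict.getD_foldl_modify_append
    ((PySem.List.enumerate parts).flatMap (fun iq => iq.2.map (fun q => (q, iq.1))))
    (PySem.Dict.empty) q
  simpa [PySem.Dict.getD_empty] using this

theorem mem_bOwners_getD (parts : List (List Int)) (q i : Int) :
    i ∈ (bOwners parts).getD q [] ↔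
      ∃ (j : Nat) (h : j < parts.length), q ∈ parts[j] ∧ i = (j : Int) := by
  rw [bOwners_getD]
  simp only [pvPairs, List.mem_map, List.mem_filter, List.mem_flatMap]
  constructor
  · rintro ⟨pr, ⟨⟨iq, hiq, hpr⟩, heq⟩, hi⟩
    rcases (PySem.List.mem_enumerate_iff _ _ _).1 hiq with ⟨k, hk, rfl⟩
    rcases hpr with ⟨x, hx, rfl⟩
    simp only [beq_iff_eq] at heq
    exact ⟨k, hk, by simpa [heq] using hx, by simpa using hi.symm⟩
  · rintro ⟨j, hj, hq, rfl⟩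
    refine ⟨(q, (j : Int)), ⟨⟨((j : Int), parts[j]), ?_, ?_⟩, by simp⟩, rfl⟩
    · exact (PySem.List.mem_enumerate_iff _ _ _).2 ⟨j, hj, by simp⟩
    · exact ⟨q, hq, rfl⟩

theorem bFilter_eq (owners : PySem.Dict Int (List Int)) (cand : List Int) (qs : List Int) :
    bFilter owners cand qs
      = cand.filter (fun i => qs.all (fun q => (owners.getD q []).contains i)) := by
  induction qs generalizing cand with
  | nil => simp [bFilter]
  | cons q rest ih =>
    simp only [bFilter]
    by_cases hc : cand.isEmpty
    · have : cand = [] := List.isEmpty_iff.1 hc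
      simp [this]
    · rw [if_neg hc, ih, List.filter_filter]
      apply List.filter_congr
      intro a _
      rw [List.all_cons, Bool.and_comm]

theorem core_nil (parts : List (List Int)) :
    (!(!parts.isEmpty)) = !pvLocal parts [] := by
  cases parts <;> simp [pvLocal]

theorem core_cons (parts : List (List Int)) (q0 : Int) (rest : List Int) :
    (bFilter (bOwners parts) ((bOwners parts).getD q0 []) rest).isEmpty
      = !pvLocal parts (q0 :: rest) := by
  rw [bFilter_eq]
  rw [Bool.eq_iff_iff]
  simp only [List.isEmpty_iff, List.filter_eq_nil_iff, Bool.not_eq_eq_eq_not, Bool.not_true,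
    pvLocal, List.any_eq_false, List.all_cons]
  constructor
  · intro h p hp hall
    rcases List.mem_iff_getElem.1 hp with ⟨j, hj, rfl⟩
    simp only [Bool.and_eq_true, List.all_eq_true, List.contains_iff_mem] at hall
    obtain ⟨hq0, hrest⟩ := hall
    refine h ((j : Int)) ((mem_bOwners_getD parts q0 _).2 ⟨j, hj, by simpa using hq0, rfl⟩) ?_
    simp only [List.all_eq_true]
    intro q hq
    simp only [List.contains_iff_mem]
    exact (mem_bOwners_getD parts q _).2 ⟨j, hj, by simpa using hrest q hq, rfl⟩
  · intro h i hi hall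
    rcases (mem_bOwners_getD parts q0 i).1 hi with ⟨j, hj, hq0, rfl⟩
    apply h parts[j] (List.mem_iff_getElem.2 ⟨j, hj, rfl⟩)
    simp only [Bool.and_eq_true, List.all_eq_true, List.contains_iff_mem]
    refine ⟨by simpa using hq0, ?_⟩
    intro q hq
    have := (List.all_eq_true.1 hall) q hq
    simp only [List.contains_iff_mem] at this
    rcases (mem_bOwners_getD parts q _).1 this with ⟨j', hj', hq', hji⟩
    have : j' = j := by exact_mod_cast hji.symm
    subst this
    simpa using hq'

theorem body_eq (parts : List (List Int)) (acc : Int) (gate : List Int) :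
    (if aIsGlobal (PySem.Set.ofList gate) parts then acc + 1 else acc)
      = (match gate with
         | [] => if !(!parts.isEmpty) then acc + 1 else acc
         | q0 :: rest =>
           if (bFilter (bOwners parts) ((bOwners parts).getD q0 []) rest).isEmpty
           then acc + 1 else acc) := by
  rw [aIsGlobal_eq]
  cases gate with
  | nil => rw [← core_nil]
  | cons q0 rest => rw [← core_cons]

-- ===== VERDICT (by name: the statement is the Claim_ definition above) =====
theorem count_global_gates_spec : Claim_equal_count_global_gates := by
  intro gl parts _
  unfold Spec_count_global_gates count_global_gates count_global_gates_alt
  exact congrArg (fun f => List.foldl f (0 : Int) gl)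
    (funext fun acc => funext fun gate => body_eq parts acc gate)
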